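-- pv_equiv track=rewrite | github.com/shuklarituparn/Machine_Learning_Course | Модуль 1. Основы программирования на Python/2.Коллекции. Функции. Работа с файлами/task_and_basics/task2.py | last_discharge
-- ===== SOURCE A (Python) =====
-- def last_discharge(entrystring):
--     carry = 1
--     res = []
--
--     pointer = len(entrystring) - 1
--     while pointer > -1 and carry > 0:
--         digit = entrystring[pointer]
--         if digit == '.':
--             pass
--         elif digit == '0':
--             digit = '9'
--         else:
--             carry = 0
--             digit = str(int(digit) - 1)
--         res.append(digit)
--         pointer -= 1
--
--     return entrystring[:pointer + 1] + ''.join(res[::-1])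
-- ===== SOURCE B (Python) =====
-- def last_discharge(entrystring):
--     stop = None
--     for i, c in enumerate(entrystring):
--         if c != '.' and c != '0':
--             stop = i
--     if stop is None:
--         return entrystring.replace('0', '9')
--     return (entrystring[:stop] + str(int(entrystring[stop]) - 1)
--             + entrystring[stop + 1:].replace('0', '9'))
-- ===== Notes on version B (the rewrite author's own statement) =====
-- stated objective: idiomatic
-- what changed: Instead of A's right-to-left while-loop threading a carry and reversing an accumulated list, B scans LEFT-to-right once remembering the last index whose char is neither '.' nor '0', then rebuilds the answer by slicing: prefix + decremented digit + suffix with zeros bulk-converted via str.replace('0','9').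
import Mathlib
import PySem

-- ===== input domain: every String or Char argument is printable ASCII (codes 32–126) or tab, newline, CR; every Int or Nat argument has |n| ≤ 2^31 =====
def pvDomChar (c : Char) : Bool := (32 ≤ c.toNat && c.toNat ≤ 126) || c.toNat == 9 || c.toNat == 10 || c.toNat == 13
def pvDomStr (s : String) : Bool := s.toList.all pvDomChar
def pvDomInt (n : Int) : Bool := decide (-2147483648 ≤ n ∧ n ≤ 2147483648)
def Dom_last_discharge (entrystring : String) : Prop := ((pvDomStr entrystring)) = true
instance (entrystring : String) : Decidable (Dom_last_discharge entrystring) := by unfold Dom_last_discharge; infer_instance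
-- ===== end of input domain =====

-- B replaces A's right-to-left carry-threading while-loop by a single LEFT-to-right pass
-- that remembers the last borrow-stop index, then rebuilds the answer by slicing with a
-- bulk str.replace('0','9') on the suffix (objective: idiomatic).

-- ===== PORT A =====
-- the while-loop: state (pointer, carry, res); fuel = s.length always suffices (pointer
-- strictly decreases).  On a non-digit stop char Python's int() raises ValueError: there
-- (and only there, excluded by Pre_) the port's '(ofChars? _).getD 0' is a stand-in.
def lastA_loop (s : List Char) : Nat → Int → Int → List Char → Int × List Char
  | 0, p, _, res => (p, res)
  | f + 1, p, carry, res =>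
    if p > -1 ∧ carry > 0 then
      match PySem.List.pyGet? s p with
      | none => (p, res)   -- unreachable: -1 < p < s.length at every call
      | some d =>
        if d = '.' then lastA_loop s f (p - 1) carry (res ++ [d])
        else if d = '0' then lastA_loop s f (p - 1) carry (res ++ ['9'])
        else lastA_loop s f (p - 1) 0
          (res ++ PySem.Int.toChars ((PySem.Int.ofChars? [d]).getD 0 - 1))
    else (p, res)

def last_discharge (entrystring : String) : String :=
  let s := entrystring.toList
  let r := lastA_loop s s.length ((s.length : Int) - 1) 1 []
  String.ofList (PySem.List.slice s none (some (r.1 + 1)) ++ r.2.reverse)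

-- ===== PORT B =====
-- the for-loop of Source B: 'stop = None; for i, c in enumerate(s): if c != '.' and c != '0': stop = i'
def pvStop (s : List Char) : Option Int :=
  (PySem.List.enumerate s).foldl
    (fun acc ic => if ic.2 ≠ '.' ∧ ic.2 ≠ '0' then some ic.1 else acc) none

def last_discharge_alt (entrystring : String) : String :=
  let s := entrystring.toList
  match pvStop s with
  | none => String.ofList (PySem.Chars.replace s ['0'] ['9'])
  | some i =>
    match PySem.List.pyGet? s i with
    | none => ""   -- unreachable: stop is a valid index
    | some c =>
      String.ofList (PySem.List.slice s none (some i)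
        ++ PySem.Int.toChars ((PySem.Int.ofChars? [c]).getD 0 - 1)
        ++ PySem.Chars.replace (PySem.List.slice s (some (i + 1)) none) ['0'] ['9'])

-- ===== PRECONDITION & SPEC =====
-- Pre_ excludes exactly the inputs where Python A raises ValueError (int(c) on the
-- rightmost character that is neither '.' nor '0' when it is not a decimal digit);
-- B's Python raises on exactly the same inputs.
def Pre_last_discharge (entrystring : String) : Prop :=
  ((entrystring.toList.reverse.find? (fun c => !(c == '.' || c == '0'))).all Char.isDigit) = true
instance (entrystring : String) : Decidable (Pre_last_discharge entrystring) := by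
  unfold Pre_last_discharge; infer_instance

def pvWitness_last_discharge : String := "100.00"

def Spec_last_discharge (entrystring : String) (out : String) : Prop := out = last_discharge_alt entrystring
instance (entrystring : String) (out : String) : Decidable (Spec_last_discharge entrystring out) := by unfold Spec_last_discharge; infer_instance

-- ===== CLAIM (what is proved, stated in full; the proofs are below) =====
def Claim_equal_last_discharge : Prop := ∀ (entrystring : String), Dom_last_discharge entrystring → Pre_last_discharge entrystring → Spec_last_discharge entrystring (last_discharge entrystring)

-- ===== LEMMAS AND PROOFS =====

-- '9' if the char is '0' else the char (what replace('0','9') does pointwise)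
def pvNine (d : Char) : Char := if d = '0' then '9' else d

-- proof-side middle form: scan indices i-1 … 0 for the borrow stop, assemble by slices
def lastB_go (s : List Char) : Nat → List Char
  | 0 => s.map pvNine
  | i + 1 =>
    match PySem.List.pyGet? s (i : Int) with
    | none => []   -- unreachable: i < s.length at every call
    | some c =>
      if c ≠ '.' ∧ c ≠ '0' then
        PySem.List.slice s none (some (i : Int))
          ++ PySem.Int.toChars ((PySem.Int.ofChars? [c]).getD 0 - 1)
          ++ (PySem.List.slice s (some ((i : Int) + 1)) none).map pvNine
      else lastB_go s i

-- replace('0','9') is the pointwise map pvNine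
theorem pv_replace_go (fuel : Nat) : ∀ (l acc : List Char), l.length ≤ fuel →
    PySem.Chars.replace.go ['0'] ['9'] fuel l acc = acc.reverse ++ l.map pvNine := by
  induction fuel with
  | zero =>
    intro l acc hl
    have : l = [] := List.eq_nil_of_length_eq_zero (by omega)
    subst this; simp [PySem.Chars.replace.go]
  | succ f ih =>
    intro l acc hl
    cases l with
    | nil => simp [PySem.Chars.replace.go]
    | cons c t =>
      by_cases hc : c = '0'
      · subst hc
        have hpre : List.isPrefixOf ['0'] ('0' :: t) = true := by simp [List.isPrefixOf]
        simp only [PySem.Chars.replace.go, hpre, if_pos]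
        rw [ih _ _ (by simpa using Nat.le_of_succ_le_succ hl)]
        simp [pvNine]
      · have hpre : List.isPrefixOf ['0'] (c :: t) = false := by
          simp [List.isPrefixOf]; exact fun h => absurd h.symm hc
        simp only [PySem.Chars.replace.go, hpre]
        rw [if_neg (by simp)]
        rw [ih _ _ (by simpa using Nat.le_of_succ_le_succ hl)]
        simp [pvNine, hc]

theorem pv_replace_eq_map (l : List Char) :
    PySem.Chars.replace l ['0'] ['9'] = l.map pvNine := by
  unfold PySem.Chars.replace
  rw [if_neg (by simp)]
  simpa using pv_replace_go l.length l [] le_rfl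

-- the left-to-right fold: appending one char updates the stop
theorem pvStop_append (xs : List Char) (c : Char) :
    pvStop (xs ++ [c]) =
      if c ≠ '.' ∧ c ≠ '0' then some (xs.length : Int) else pvStop xs := by
  unfold pvStop
  rw [PySem.List.enumerate_append]
  rw [List.foldl_append]
  simp [PySem.List.enumerate]

theorem pvStop_nil : pvStop [] = none := by simp [pvStop, PySem.List.enumerate]

-- str(int(c) - 1) is a single character when c is a digit other than '0', so char-level
-- reversal leaves it unchanged.
theorem pv_ds_single (c : Char) (h : c.isDigit = true) (h0 : ¬ c = '0') :
    (PySem.Int.toChars ((PySem.Int.ofChars? [c]).getD 0 - 1)).reverse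
      = PySem.Int.toChars ((PySem.Int.ofChars? [c]).getD 0 - 1) := by
  simp [Char.isDigit] at h
  obtain ⟨h1, h2⟩ := h
  have h1' : 48 ≤ c.val.toNat := UInt32.le_iff_toNat_le.mp h1
  have h2' : c.val.toNat ≤ 57 := UInt32.le_iff_toNat_le.mp h2
  have h0' : c.val.toNat ≠ 48 := by
    intro he; exact h0 (Char.ext (UInt32.toNat_inj.mp he))
  have hc : c = Char.ofNat c.toNat := (Char.ofNat_toNat c).symm
  have htn : c.toNat = c.val.toNat := rfl
  interval_cases hv : c.val.toNat <;> (rw [hc, htn]) <;>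
    first | exact absurd rfl h0' | decide

-- once the carry is 0 the while-condition is false: the loop returns its state unchanged
theorem lastA_loop_carry_zero (s : List Char) (f : Nat) (p : Int) (res : List Char) :
    lastA_loop s f p 0 res = (p, res) := by
  cases f <;> simp [lastA_loop]

-- loop invariant: starting at pointer i-1 with carry 1, res = processed suffix (reversed),
-- A's assembled result equals the middle form's scan from index i
theorem pv_loop_eq (s : List Char) :
    ∀ (i f : Nat), i ≤ f → i ≤ s.length →
      (((s.take i).reverse.find? (fun c => !(c == '.' || c == '0'))).all Char.isDigit) = true →
      PySem.List.slice s none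
          (some ((lastA_loop s f ((i : Int) - 1) 1 (((s.drop i).map pvNine).reverse)).1 + 1))
        ++ (lastA_loop s f ((i : Int) - 1) 1 (((s.drop i).map pvNine).reverse)).2.reverse
      = lastB_go s i := by
  intro i
  induction i with
  | zero =>
    intro f _ _ _
    have hstop : lastA_loop s f (-1) 1 ((s.map pvNine).reverse)
        = (-1, (s.map pvNine).reverse) := by
      cases f <;> simp [lastA_loop]
    have h0 : ((0 : Nat) : Int) - 1 = -1 := by omega
    rw [List.drop_zero, h0, hstop]
    dsimp only
    norm_num
    rw [PySem.List.slice_to s le_rfl]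
    simp [lastB_go]
  | succ i ih =>
    intro f hif hi hpre
    obtain ⟨f', rfl⟩ : ∃ f', f = f' + 1 := ⟨f - 1, by omega⟩
    have hilt : i < s.length := by omega
    have hcast : ((i + 1 : Nat) : Int) - 1 = (i : Int) := by push_cast; omega
    have hget : PySem.List.pyGet? s ((i : Nat) : Int) = some s[i] := by
      rw [PySem.List.pyGet?_natCast]
      exact List.getElem?_eq_getElem hilt
    have hdrop : s.drop i = s[i] :: s.drop (i + 1) := List.drop_eq_getElem_cons hilt
    have htake : (s.take (i + 1)).reverse = s[i] :: (s.take i).reverse := by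
      rw [List.take_add_one, List.getElem?_eq_getElem hilt]
      simp
    simp only [lastA_loop, hcast, hget]
    rw [if_pos (by constructor <;> omega)]
    simp only [lastB_go, hget]
    by_cases hdot : s[i] = '.'
    · rw [if_pos hdot]
      have hres : (((s.drop (i + 1)).map pvNine).reverse) ++ [s[i]]
          = ((s.drop i).map pvNine).reverse := by
        rw [hdrop]; simp [pvNine, hdot]
      rw [hres]
      rw [if_neg (show ¬ (s[i] ≠ '.' ∧ s[i] ≠ '0') by simp [hdot])]
      refine ih f' (by omega) (by omega) ?_
      rw [htake, List.find?_cons_of_neg (by simp [hdot])] at hpre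
      exact hpre
    · rw [if_neg hdot]
      by_cases hzero : s[i] = '0'
      · rw [if_pos hzero]
        have hres : (((s.drop (i + 1)).map pvNine).reverse) ++ ['9']
            = ((s.drop i).map pvNine).reverse := by
          rw [hdrop]; simp [pvNine, hzero]
        rw [hres]
        rw [if_neg (show ¬ (s[i] ≠ '.' ∧ s[i] ≠ '0') by simp [hzero])]
        refine ih f' (by omega) (by omega) ?_
        rw [htake, List.find?_cons_of_neg (by simp [hzero])] at hpre
        exact hpre
      · rw [if_neg hzero, if_pos ⟨hdot, hzero⟩]
        have hdig : (s[i]).isDigit = true := by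
          rw [htake, List.find?_cons_of_pos (by simp [hdot, hzero])] at hpre
          simpa using hpre
        rw [lastA_loop_carry_zero]
        dsimp only
        have h1 : (i : Int) - 1 + 1 = ((i : Nat) : Int) := by omega
        rw [h1, PySem.List.slice_to_natCast]
        rw [PySem.List.slice_from s (by omega : (0 : Int) ≤ (i : Int) + 1)]
        have h3 : ((i : Int) + 1).toNat = i + 1 := by omega
        rw [h3]
        simp only [List.reverse_append, List.reverse_reverse]
        rw [pv_ds_single s[i] hdig hzero, List.append_assoc]

-- B's assembly from the scanned stop of the first i chars equals the middle form
theorem pv_alt_eq (s : List Char) :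
    ∀ i, i ≤ s.length →
      (match pvStop (s.take i) with
        | none => s.map pvNine
        | some j =>
          match PySem.List.pyGet? s j with
          | none => []
          | some c =>
            PySem.List.slice s none (some j)
              ++ PySem.Int.toChars ((PySem.Int.ofChars? [c]).getD 0 - 1)
              ++ PySem.Chars.replace (PySem.List.slice s (some (j + 1)) none) ['0'] ['9'])
      = lastB_go s i := by
  intro i
  induction i with
  | zero => intro _; simp [pvStop_nil, lastB_go]
  | succ i ih =>
    intro hi
    have hilt : i < s.length := by omega
    have htake : s.take (i + 1) = s.take i ++ [s[i]] := by
      rw [List.take_add_one, List.getElem?_eq_getElem hilt]; simp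
    have hget : PySem.List.pyGet? s ((i : Nat) : Int) = some s[i] := by
      rw [PySem.List.pyGet?_natCast]
      exact List.getElem?_eq_getElem hilt
    rw [htake, pvStop_append]
    by_cases hp : s[i] ≠ '.' ∧ s[i] ≠ '0'
    · rw [if_pos hp]
      have hlen : ((s.take i).length : Int) = (i : Int) := by
        rw [List.length_take]; omega
      simp only [hlen, lastB_go, hget]
      rw [if_pos hp]
      rw [pv_replace_eq_map]
    · rw [if_neg hp]
      simp only [lastB_go, hget]
      rw [if_neg hp]
      exact ih (by omega)

-- ===== VERDICT (by name: the statement is the Claim_ definition above) =====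
theorem last_discharge_spec : Claim_equal_last_discharge := by
  intro e _hdom hpre
  unfold Spec_last_discharge last_discharge last_discharge_alt
  have hp : (((e.toList.take e.toList.length).reverse.find?
      (fun c => !(c == '.' || c == '0'))).all Char.isDigit) = true := by
    rw [List.take_length]; exact hpre
  have hA := pv_loop_eq e.toList e.toList.length e.toList.length le_rfl le_rfl hp
  simp only [List.drop_length, List.map_nil, List.reverse_nil] at hA
  have hB := pv_alt_eq e.toList e.toList.length le_rfl
  rw [List.take_length] at hB
  dsimp only
  rw [← hB] at hA
  cases hstop : pvStop e.toList with
  | none =>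
    rw [hstop] at hA
    dsimp only at hA ⊢
    rw [pv_replace_eq_map]
    exact congrArg String.ofList hA
  | some j =>
    rw [hstop] at hA
    dsimp only at hA ⊢
    cases hget : PySem.List.pyGet? e.toList j with
    | none =>
      simp only [hget] at hA ⊢
      rw [hA]
    | some c =>
      simp only [hget] at hA ⊢
      exact congrArg String.ofList hA
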